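-- pv_equiv track=rewrite | github.com/LeeeWayyy/trading_platform | scripts/dev/check_doc_freshness.py | _filter_doc_entries_to_scope
-- ===== SOURCE A (Python) =====
-- from collections.abc import Iterable
--
-- def normalize_path(path: str) -> str:
--     """
--     Normalize path to canonical format for comparison.
--
--     Rules:
--         - Strip leading "./"
--         - Ensure trailing "/" for directories
--         - Root-relative (no leading "/")
--     """
--
--     normalized = path.strip()
--     if normalized.startswith("./"):
--         normalized = normalized[2:]
--     if normalized.startswith("/"):
--         normalized = normalized[1:]
--     if normalized and not normalized.endswith("/"):
--         normalized += "/"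
--     return normalized
--
-- def _filter_doc_entries_to_scope(entries: set[str], source_dirs: Iterable[str]) -> set[str]:
--     """Filter documented entries to only those in scope of source directory patterns."""
--
--     scoped: set[str] = set()
--     for entry in entries:
--         for raw in source_dirs:
--             pattern = normalize_path(raw)
--             if pattern.endswith("*/"):
--                 parent = pattern[:-2]
--                 if not entry.startswith(parent):
--                     continue
--                 remainder = entry[len(parent) :].strip("/")
--                 if remainder and "/" not in remainder:
--                     scoped.add(entry)
--             else:
--                 if entry == pattern:
--                     scoped.add(entry)
--     return scoped
-- ===== SOURCE B (Python) =====
-- def normalize_path(path: str) -> str: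
--     normalized = path.strip()
--     if normalized.startswith("./"):
--         normalized = normalized[2:]
--     if normalized.startswith("/"):
--         normalized = normalized[1:]
--     if normalized and not normalized.endswith("/"):
--         normalized += "/"
--     return normalized
--
-- def _filter_doc_entries_to_scope(entries, source_dirs):
--     """Normalize the patterns once, split them into exact names and wildcard
--     parents, then keep every entry that passes a single in-scope test."""
--     exacts = set()
--     wildcard_parents = []
--     for raw in source_dirs:
--         pattern = normalize_path(raw)
--         if pattern.endswith("*/"):
--             wildcard_parents.append(pattern[:-2])
--         else:
--             exacts.add(pattern)
--
--     def in_scope(entry):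
--         if entry in exacts:
--             return True
--         for parent in wildcard_parents:
--             if entry.startswith(parent):
--                 remainder = entry[len(parent):].strip("/")
--                 if remainder and "/" not in remainder:
--                     return True
--         return False
--
--     return {entry for entry in entries if in_scope(entry)}
-- ===== Notes on version B (the rewrite author's own statement) =====
-- stated objective: faster
-- what changed: B normalizes each source pattern exactly once and splits them into an exact-name set and a wildcard-parent list, then keeps the entries in a single filtering pass (set membership for exact patterns, a scan of the wildcard parents only), instead of A's nested loops that re-normalize every pattern for every entry and test each (entry, pattern) pair.
import Mathlib
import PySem

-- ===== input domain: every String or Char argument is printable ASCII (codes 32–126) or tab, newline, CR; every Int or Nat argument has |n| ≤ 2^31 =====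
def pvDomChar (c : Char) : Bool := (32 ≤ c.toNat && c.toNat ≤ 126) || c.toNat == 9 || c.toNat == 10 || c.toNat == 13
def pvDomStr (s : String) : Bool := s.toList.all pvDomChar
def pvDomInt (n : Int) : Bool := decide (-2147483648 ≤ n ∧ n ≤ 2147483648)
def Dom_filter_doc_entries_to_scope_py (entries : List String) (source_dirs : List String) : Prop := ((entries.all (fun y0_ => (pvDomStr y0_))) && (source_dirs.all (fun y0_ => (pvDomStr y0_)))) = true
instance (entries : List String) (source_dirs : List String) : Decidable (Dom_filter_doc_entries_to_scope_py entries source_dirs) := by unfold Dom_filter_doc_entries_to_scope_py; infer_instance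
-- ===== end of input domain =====

-- B normalizes every source pattern once and splits them into exact names and wildcard
-- parents, then filters the entries in one pass (objective: a constant-factor speedup).

-- ===== PORT A =====
-- normalize_path, on code points (s + "/" is list append)
def pvNormalizePath (path : List Char) : List Char :=
  let n := PySem.Chars.strip path
  let n := if PySem.Chars.startswith n ['.', '/'] then PySem.List.slice n (some 2) none else n
  let n := if PySem.Chars.startswith n ['/'] then PySem.List.slice n (some 1) none else n
  if decide (n ≠ []) && !PySem.Chars.endswith n ['/'] then n ++ ['/'] else n

-- the body of A's inner 'for raw in source_dirs' loop
def pvInnerA (entry : String) (sc : PySem.Set String) (raw : String) : PySem.Set String :=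
  let pattern := pvNormalizePath raw.toList
  if PySem.Chars.endswith pattern ['*', '/'] then
    let parent := PySem.List.slice pattern none (some (-2))
    if !PySem.Chars.startswith entry.toList parent then sc   -- continue
    else
      let remainder := PySem.Chars.stripChars (PySem.List.slice entry.toList (some (parent.length : Int)) none) ['/']
      if decide (remainder ≠ []) && !PySem.Chars.isIn ['/'] remainder then PySem.Set.add sc entry else sc
  else
    if entry.toList == pattern then PySem.Set.add sc entry else sc

def filter_doc_entries_to_scope_py (entries : List String) (source_dirs : List String) : List String :=
  entries.foldl (fun sc entry => source_dirs.foldl (pvInnerA entry) sc) PySem.Set.empty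

-- ===== PORT B =====
-- one-level wildcard test under a parent (the body of B's in_scope loop)
def pvWildMatch (entry : List Char) (parent : List Char) : Bool :=
  PySem.Chars.startswith entry parent &&
    (let remainder := PySem.Chars.stripChars (PySem.List.slice entry (some (parent.length : Int)) none) ['/']
     decide (remainder ≠ []) && !PySem.Chars.isIn ['/'] remainder)

-- B's preprocessing loop body: sort one normalized pattern into (exacts, wildcard_parents)
def pvSplitStep (acc : PySem.Set (List Char) × List (List Char)) (raw : String) :
    PySem.Set (List Char) × List (List Char) :=
  let pattern := pvNormalizePath raw.toList
  if PySem.Chars.endswith pattern ['*', '/'] then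
    (acc.1, acc.2 ++ [PySem.List.slice pattern none (some (-2))])
  else
    (PySem.Set.add acc.1 pattern, acc.2)

-- B's in_scope: exact-set membership, else some wildcard parent matches
def pvInScope (exacts : PySem.Set (List Char)) (wildcardParents : List (List Char)) (entry : String) : Bool :=
  PySem.Set.contains exacts entry.toList || wildcardParents.any (fun parent => pvWildMatch entry.toList parent)

def filter_doc_entries_to_scope_py_alt (entries : List String) (source_dirs : List String) : List String :=
  let split := source_dirs.foldl pvSplitStep (PySem.Set.empty, [])
  PySem.Set.ofList (entries.filter (fun entry => pvInScope split.1 split.2 entry))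

-- ===== PRECONDITION & SPEC =====
def Spec_filter_doc_entries_to_scope_py (entries : List String) (source_dirs : List String) (out : List String) : Prop := out = filter_doc_entries_to_scope_py_alt entries source_dirs
instance (entries : List String) (source_dirs : List String) (out : List String) : Decidable (Spec_filter_doc_entries_to_scope_py entries source_dirs out) := by unfold Spec_filter_doc_entries_to_scope_py; infer_instance

-- ===== CLAIM (what is proved, stated in full; the proofs are below) =====
def Claim_equal_filter_doc_entries_to_scope_py : Prop := ∀ (entries : List String) (source_dirs : List String), Dom_filter_doc_entries_to_scope_py entries source_dirs → Spec_filter_doc_entries_to_scope_py entries source_dirs (filter_doc_entries_to_scope_py entries source_dirs)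

-- ===== LEMMAS AND PROOFS =====

-- A's test for one entry against one raw pattern (proof-only characterisation of pvInnerA)
def pvMatchOne (entry : String) (raw : String) : Bool :=
  let pattern := pvNormalizePath raw.toList
  if PySem.Chars.endswith pattern ['*', '/'] then
    pvWildMatch entry.toList (PySem.List.slice pattern none (some (-2)))
  else
    entry.toList == pattern

lemma set_add_idem {α : Type} [BEq α] [LawfulBEq α] (s : PySem.Set α) (x : α) :
    PySem.Set.add (PySem.Set.add s x) x = PySem.Set.add s x := by
  simp only [PySem.Set.add]
  by_cases hm : x ∈ s <;> simp [hm]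

lemma contains_add_eq {α : Type} [BEq α] [LawfulBEq α] (s : PySem.Set α) (x y : α) :
    PySem.Set.contains (PySem.Set.add s x) y = (y == x || PySem.Set.contains s y) := by
  simp only [PySem.Set.add]
  by_cases hm : x ∈ s <;> by_cases hy : y = x <;> simp [hm, hy]

-- pvInnerA adds the entry exactly when pvMatchOne holds
lemma innerA_step (entry : String) (sc : PySem.Set String) (raw : String) :
    pvInnerA entry sc raw = if pvMatchOne entry raw then PySem.Set.add sc entry else sc := by
  unfold pvInnerA pvMatchOne pvWildMatch
  set pat := pvNormalizePath raw.toList with hpat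
  by_cases h1 : PySem.Chars.endswith pat ['*', '/'] = true
  · rw [if_pos h1, if_pos h1]
    set par := PySem.List.slice pat none (some (-2)) with hpar
    by_cases h2 : PySem.Chars.startswith entry.toList par = true
    · simp only [h2, Bool.not_true, Bool.true_and, Bool.false_eq_true, if_false]
    · simp [h2]
  · rw [if_neg h1, if_neg h1]

-- A's inner loop over source_dirs adds the entry iff some pattern matches it
lemma innerA_eq (entry : String) (sds : List String) (s : PySem.Set String) :
    sds.foldl (pvInnerA entry) s
      = if sds.any (fun raw => pvMatchOne entry raw) then PySem.Set.add s entry else s := by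
  induction sds generalizing s with
  | nil => simp
  | cons raw rest ih =>
    rw [List.foldl_cons, List.any_cons, ih, innerA_step]
    cases hm : pvMatchOne entry raw <;>
      cases hr : rest.any (fun raw => pvMatchOne entry raw) <;>
      simp only [hm, hr, Bool.false_or, Bool.true_or, Bool.or_false, Bool.false_eq_true,
        ite_false, ite_true, set_add_idem]

-- B's split fold turns "some pattern matches" into the in_scope test
lemma split_inScope (entry : String) (sds : List String) (acc : PySem.Set (List Char) × List (List Char)) :
    pvInScope (sds.foldl pvSplitStep acc).1 (sds.foldl pvSplitStep acc).2 entry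
      = (pvInScope acc.1 acc.2 entry || sds.any (fun raw => pvMatchOne entry raw)) := by
  induction sds generalizing acc with
  | nil => simp
  | cons raw rest ih =>
    rw [List.foldl_cons, List.any_cons, ih]
    by_cases h : PySem.Chars.endswith (pvNormalizePath raw.toList) ['*', '/'] = true
    · simp only [pvSplitStep, pvInScope, pvMatchOne, h, ite_true, List.any_append, List.any_cons,
        List.any_nil]
      cases PySem.Set.contains acc.1 entry.toList <;>
        cases pvWildMatch entry.toList (PySem.List.slice (pvNormalizePath raw.toList) none (some (-2))) <;>
        cases acc.2.any (fun parent => pvWildMatch entry.toList parent) <;> simp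
    · simp only [pvSplitStep, pvInScope, pvMatchOne, h, Bool.false_eq_true, ite_false,
        contains_add_eq]
      cases PySem.Set.contains acc.1 entry.toList <;>
        cases (entry.toList == pvNormalizePath raw.toList) <;>
        cases acc.2.any (fun parent => pvWildMatch entry.toList parent) <;> simp

-- ===== VERDICT (by name: the statement is the Claim_ definition above) =====
theorem filter_doc_entries_to_scope_py_spec : Claim_equal_filter_doc_entries_to_scope_py := by
  intro entries source_dirs _hDom
  unfold Spec_filter_doc_entries_to_scope_py
  unfold filter_doc_entries_to_scope_py filter_doc_entries_to_scope_py_alt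
  simp only [innerA_eq]
  have hsc : ∀ e : String,
      pvInScope (source_dirs.foldl pvSplitStep (PySem.Set.empty, [])).1
        (source_dirs.foldl pvSplitStep (PySem.Set.empty, [])).2 e
      = source_dirs.any (fun raw => pvMatchOne e raw) := by
    intro e
    rw [split_inScope]
    simp [pvInScope, PySem.Set.empty, PySem.Set.contains]
  simp only [hsc]
  rw [PySem.Set.ofList_eq_foldl, ← List.foldl_filter]
  rfl
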